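-- pv_equiv track=rewrite | github.com/tsenturion/top-python | uyty/экзамен/analytics.py | calculate_total_revenue
-- ===== SOURCE A (Python) =====
-- def calculate_total_revenue(orders):
--     total = 0
--     for order in orders:
--         amount = order.get("amount", 0)
--         if amount < 0:
--             raise ValueError("Order amount cannot be negative")
--         total += amount
--     return total
-- ===== SOURCE B (Python) =====
-- def calculate_total_revenue(orders):
--     orders = list(orders)
--
--     def seg(lo, hi):
--         # divide-and-conquer sum of the segment orders[lo:hi]
--         if lo == hi:
--             return 0
--         if hi - lo == 1:
--             a = orders[lo].get("amount", 0)
--             if a < 0: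
--                 raise ValueError("Order amount cannot be negative")
--             return a
--         mid = (lo + hi) // 2
--         return seg(lo, mid) + seg(mid, hi)
--
--     return seg(0, len(orders))
-- ===== Notes on version B (the rewrite author's own statement) =====
-- stated objective: alternative
-- what changed: Replaces A's left-to-right fused validate-and-accumulate loop with a recursive divide-and-conquer over index segments: each half is validated and summed independently and the two partial sums are combined; correct because integer addition is associative so the split order does not change the total.
import Mathlib
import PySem

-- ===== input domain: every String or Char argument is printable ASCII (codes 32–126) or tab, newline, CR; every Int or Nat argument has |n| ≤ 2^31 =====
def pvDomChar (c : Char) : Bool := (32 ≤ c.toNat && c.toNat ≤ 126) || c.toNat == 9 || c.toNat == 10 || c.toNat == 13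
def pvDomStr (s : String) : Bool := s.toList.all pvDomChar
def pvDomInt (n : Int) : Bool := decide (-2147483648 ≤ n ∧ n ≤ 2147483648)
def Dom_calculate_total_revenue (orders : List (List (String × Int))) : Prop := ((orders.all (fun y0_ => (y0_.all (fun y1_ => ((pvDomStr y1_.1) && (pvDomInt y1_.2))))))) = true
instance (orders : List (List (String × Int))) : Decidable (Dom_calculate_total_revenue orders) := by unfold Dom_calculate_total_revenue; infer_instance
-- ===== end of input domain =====

-- B replaces A's fused left-to-right validate-and-accumulate loop with a recursive
-- divide-and-conquer over segments; equivalence is on the return value, and Pre_ excludes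
-- the inputs with a negative "amount", on which both A and B raise ValueError.

-- ===== PORT A =====
-- A's for-loop; 'raise ValueError' is modelled by none, excluded by Pre_.
def pvLoopA : List (List (String × Int)) → Int → Option Int
  | [], total => some total
  | order :: rest, total =>
      let amount := (PySem.Dict.ofList order).getD "amount" 0
      if amount < 0 then none else pvLoopA rest (total + amount)

def calculate_total_revenue (orders : List (List (String × Int))) : Int :=
  (pvLoopA orders 0).getD 0

-- ===== PORT B =====
-- B's seg(lo, hi) works on the segment orders[lo:hi] with mid = (lo+hi)//2, so the
-- recursive calls are on the first length/2 elements and the rest; the port carries the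
-- segment itself (take (length/2) / drop (length/2) are exactly orders[lo:mid] / orders[mid:hi]).
def pvSegB : List (List (String × Int)) → Option Int
  | [] => some 0
  | [o] =>
      let a := (PySem.Dict.ofList o).getD "amount" 0
      if a < 0 then none else some a
  | a :: b :: rest =>
      let mid := (a :: b :: rest).length / 2
      match pvSegB ((a :: b :: rest).take mid), pvSegB ((a :: b :: rest).drop mid) with
      | some l, some r => some (l + r)
      | _, _ => none
termination_by xs => xs.length
decreasing_by
  · simp only [List.length_take, List.length_cons]
    omega
  · simp only [List.length_drop, List.length_cons]
    omega

def calculate_total_revenue_alt (orders : List (List (String × Int))) : Int :=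
  (pvSegB orders).getD 0

-- ===== PRECONDITION & SPEC =====
-- Pre_ excludes exactly the inputs with a negative "amount", on which both A and B raise ValueError.
def Pre_calculate_total_revenue (orders : List (List (String × Int))) : Prop :=
  ∀ order ∈ orders, 0 ≤ (PySem.Dict.ofList order).getD "amount" 0
instance (orders : List (List (String × Int))) : Decidable (Pre_calculate_total_revenue orders) := by unfold Pre_calculate_total_revenue; infer_instance
def pvWitness_calculate_total_revenue : (List (List (String × Int))) := [[("amount", 3)], [("x", 1)], [("amount", 2)]]

def Spec_calculate_total_revenue (orders : List (List (String × Int))) (out : Int) : Prop := out = calculate_total_revenue_alt orders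
instance (orders : List (List (String × Int))) (out : Int) : Decidable (Spec_calculate_total_revenue orders out) := by unfold Spec_calculate_total_revenue; infer_instance

-- ===== CLAIM =====
def Claim_equal_calculate_total_revenue : Prop := ∀ (orders : List (List (String × Int))), Dom_calculate_total_revenue orders → Pre_calculate_total_revenue orders → Spec_calculate_total_revenue orders (calculate_total_revenue orders)

-- ===== LEMMAS AND PROOFS =====
def pvAmt (o : List (String × Int)) : Int := (PySem.Dict.ofList o).getD "amount" 0

theorem pvLoopA_sum (orders : List (List (String × Int)))
    (h : ∀ o ∈ orders, 0 ≤ pvAmt o) :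
    ∀ t : Int, pvLoopA orders t = some (t + (orders.map pvAmt).sum) := by
  induction orders with
  | nil => intro t; simp [pvLoopA]
  | cons o rest ih =>
    intro t
    have h0 := h o (List.mem_cons_self ..)
    simp only [pvAmt] at h0
    simp only [pvLoopA, if_neg (not_lt.mpr h0)]
    rw [ih (fun x hx => h x (List.mem_cons_of_mem _ hx))]
    simp [pvAmt, add_assoc]

theorem pvSegB_sum : ∀ (n : ℕ) (xs : List (List (String × Int))), xs.length = n →
    (∀ o ∈ xs, 0 ≤ pvAmt o) → pvSegB xs = some ((xs.map pvAmt).sum) := by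
  intro n
  induction n using Nat.strong_induction_on with
  | _ n ih =>
    intro xs hn h
    match xs with
    | [] => simp [pvSegB]
    | [o] =>
      have h0 := h o (List.mem_cons_self ..)
      simp only [pvAmt] at h0
      simp only [pvSegB, if_neg (not_lt.mpr h0)]
      simp [pvAmt]
    | a :: b :: rest =>
      rw [pvSegB]
      have hn' : rest.length + 2 = n := by simpa using hn
      have hmidn : n / 2 < n := by omega
      have htake : ((a :: b :: rest).take ((a :: b :: rest).length / 2)).length = n / 2 := by
        simp only [List.length_take, List.length_cons]; omega
      have hdrop : ((a :: b :: rest).drop ((a :: b :: rest).length / 2)).length = n - n / 2 := by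
        simp only [List.length_drop, List.length_cons]; omega
      rw [ih (n / 2) hmidn _ htake
            (fun o ho => h o (List.mem_of_mem_take ho)),
          ih (n - n / 2) (by omega) _ hdrop
            (fun o ho => h o (List.mem_of_mem_drop ho))]
      have hsplit := List.take_append_drop ((a :: b :: rest).length / 2) (a :: b :: rest)
      calc some (((((a :: b :: rest).take ((a :: b :: rest).length / 2)).map pvAmt).sum)
              + ((((a :: b :: rest).drop ((a :: b :: rest).length / 2)).map pvAmt).sum))
          = some ((((a :: b :: rest).take ((a :: b :: rest).length / 2)
                    ++ (a :: b :: rest).drop ((a :: b :: rest).length / 2)).map pvAmt).sum) := by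
            simp
        _ = some (((a :: b :: rest).map pvAmt).sum) := by rw [hsplit]

-- ===== VERDICT =====
theorem calculate_total_revenue_spec : Claim_equal_calculate_total_revenue := by
  intro orders _ hpre
  unfold Spec_calculate_total_revenue calculate_total_revenue calculate_total_revenue_alt
  rw [pvLoopA_sum orders hpre 0, pvSegB_sum orders.length orders rfl hpre]
  simp
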